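-- pv_equiv track=rewrite | github.com/ConnorMcLaren-Kennedy/coordfloor | scripts/01_preprocess.py | find_label_index
-- ===== SOURCE A (Python) =====
-- def find_label_index(labels: list[str], target: str) -> int:
--     # exact match preferred; else case-insensitive
--     if target in labels:
--         return labels.index(target)
--     lower = [str(x).lower() for x in labels]
--     t = target.lower()
--     if t in lower:
--         return lower.index(t)
--     raise ValueError(f"Analog label not found: {target}. Available example: {labels[:10]}...")
-- ===== SOURCE B (Python) =====
-- def find_label_index(labels: list[str], target: str) -> int:
--     # single pass: record first exact and first case-insensitive hit
--     t = target.lower()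
--     exact = None
--     ci = None
--     for i, x in enumerate(labels):
--         if exact is None and x == target:
--             exact = i
--         if ci is None and str(x).lower() == t:
--             ci = i
--     if exact is not None:
--         return exact
--     if ci is not None:
--         return ci
--     raise ValueError(f"Analog label not found: {target}. Available example: {labels[:10]}...")
-- ===== Notes on version B (the rewrite author's own statement) =====
-- stated objective: alternative
-- what changed: Replaces A's up-to-four scans (membership test + .index, then build a full lowercased copy and scan it twice) by one enumerate pass that records the first exact and first case-insensitive hit and prefers the exact one.
import Mathlib
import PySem

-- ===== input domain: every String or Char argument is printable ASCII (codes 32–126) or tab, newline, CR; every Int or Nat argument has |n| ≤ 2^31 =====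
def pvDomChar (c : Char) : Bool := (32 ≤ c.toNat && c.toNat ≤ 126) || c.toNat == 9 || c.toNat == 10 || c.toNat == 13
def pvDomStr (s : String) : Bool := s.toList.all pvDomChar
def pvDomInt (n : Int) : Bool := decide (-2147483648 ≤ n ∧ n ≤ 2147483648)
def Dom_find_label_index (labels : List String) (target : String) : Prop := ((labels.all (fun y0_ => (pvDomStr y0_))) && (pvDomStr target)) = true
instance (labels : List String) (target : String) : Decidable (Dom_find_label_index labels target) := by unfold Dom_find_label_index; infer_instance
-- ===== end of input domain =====

-- B replaces A's repeated scans with a single enumerate pass recording the first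
-- exact and first case-insensitive hit (alternative decomposition, same O(n) cost).

-- ===== PORT A =====
def find_label_index (labels : List String) (target : String) : Int :=
  if labels.contains target then
    (((PySem.List.index? labels target).getD 0 : Nat) : Int)
  else
    let lower := labels.map (fun x => PySem.Str.lower x)
    let t := PySem.Str.lower target
    if lower.contains t then
      (((PySem.List.index? lower t).getD 0 : Nat) : Int)
    else
      0  -- Python raises ValueError here; excluded by Pre_find_label_index

-- ===== PORT B =====
def find_label_index_alt (labels : List String) (target : String) : Int :=
  let t := PySem.Str.lower target
  let st := (PySem.List.enumerate labels 0).foldl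
    (fun (s : Option Int × Option Int) p =>
      ( if s.1.isNone && (p.2 == target) then some p.1 else s.1,
        if s.2.isNone && (PySem.Str.lower p.2 == t) then some p.1 else s.2))
    (none, none)
  match st.1 with
  | some e => e
  | none =>
    match st.2 with
    | some c => c
    | none => 0  -- Python raises ValueError here; excluded by Pre_find_label_index

-- ===== PRECONDITION & SPEC =====
-- Pre_ excludes exactly the inputs with no exact and no case-insensitive match,
-- on which both A and B raise ValueError.
def Pre_find_label_index (labels : List String) (target : String) : Prop :=
  labels.contains target = true ∨
  (labels.map (fun x => PySem.Str.lower x)).contains (PySem.Str.lower target) = true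
instance (labels : List String) (target : String) : Decidable (Pre_find_label_index labels target) := by unfold Pre_find_label_index; infer_instance

def pvWitness_find_label_index : List String × String := (["A", "b", "C"], "B")

def Spec_find_label_index (labels : List String) (target : String) (out : Int) : Prop := out = find_label_index_alt labels target
instance (labels : List String) (target : String) (out : Int) : Decidable (Spec_find_label_index labels target out) := by unfold Spec_find_label_index; infer_instance

-- ===== CLAIM (what is proved, stated in full; the proofs are below) =====
def Claim_equal_find_label_index : Prop := ∀ (labels : List String) (target : String), Dom_find_label_index labels target → Pre_find_label_index labels target → Spec_find_label_index labels target (find_label_index labels target)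

-- ===== LEMMAS AND PROOFS =====

-- step function of B's fold, one component at a time
def pvStep (q : String → Bool) (s : Option Int) (p : Int × String) : Option Int :=
  if s.isNone && q p.2 then some p.1 else s

theorem pvStep_some (q : String → Bool) (j : Int) :
    ∀ (l : List (Int × String)), l.foldl (pvStep q) (some j) = some j := by
  intro l; induction l with
  | nil => rfl
  | cons p l ih => simpa [pvStep] using ih

theorem pvFold_pair (target t : String) :
    ∀ (l : List (Int × String)) (s : Option Int × Option Int),
      l.foldl (fun (s : Option Int × Option Int) p =>
        ( if s.1.isNone && (p.2 == target) then some p.1 else s.1,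
          if s.2.isNone && (PySem.Str.lower p.2 == t) then some p.1 else s.2)) s
      = (l.foldl (pvStep (fun x => x == target)) s.1,
         l.foldl (pvStep (fun x => PySem.Str.lower x == t)) s.2) := by
  intro l; induction l with
  | nil => intro s; rfl
  | cons p l ih =>
    intro s
    rw [List.foldl_cons, ih]
    rfl

theorem pvFold_first (q : String → Bool) :
    ∀ (xs : List String) (n : Int),
      (PySem.List.enumerate xs n).foldl (pvStep q) none
        = (List.findIdx? q xs).map (fun k => n + (k : Int)) := by
  intro xs; induction xs with
  | nil => intro n; simp [PySem.List.enumerate]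
  | cons x xs ih =>
    intro n
    rw [PySem.List.enumerate_cons]
    by_cases hq : q x = true
    · simp [pvStep, hq, pvStep_some, List.findIdx?_cons]
    · rw [List.foldl_cons]
      have hstep : pvStep q none (n, x) = none := by simp [pvStep, hq]
      rw [hstep, ih, List.findIdx?_cons, if_neg hq]
      cases h : List.findIdx? q xs with
      | none => simp
      | some k => simp; ring

-- index? as a findIdx?
theorem pvIndex?_eq_findIdx? (xs : List String) (v : String) :
    PySem.List.index? xs v = List.findIdx? (fun x => x == v) xs := by
  rw [PySem.List.index?_eq_idxOf?]
  simp [List.idxOf?]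

-- ===== VERDICT (by name: the statement is the Claim_ definition above) =====
theorem find_label_index_spec : Claim_equal_find_label_index := by
  intro labels target _ hpre
  unfold Spec_find_label_index find_label_index find_label_index_alt
  simp only [pvFold_pair]
  have hx : (PySem.List.enumerate labels 0).foldl (pvStep (fun x => x == target)) none
      = (PySem.List.index? labels target).map (fun k => (k : Int)) := by
    rw [pvFold_first, pvIndex?_eq_findIdx?]; simp
  have hc : (PySem.List.enumerate labels 0).foldl
      (pvStep (fun x => PySem.Str.lower x == PySem.Str.lower target)) none
      = (PySem.List.index? (labels.map (fun x => PySem.Str.lower x)) (PySem.Str.lower target)).map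
          (fun k => (k : Int)) := by
    rw [pvFold_first, pvIndex?_eq_findIdx?, List.findIdx?_map]
    simp [Function.comp_def]
  simp only [hx, hc]
  by_cases hmem : labels.contains target = true
  · have : (PySem.List.index? labels target).isSome := by
      rw [PySem.List.index?_isSome_iff]; simpa using hmem
    obtain ⟨k, hk⟩ := Option.isSome_iff_exists.mp this
    rw [PySem.List.index?_eq_idxOf?] at hk
    have hm : target ∈ labels := by simpa using hmem
    simp [hm, hk]
  · have hnone : PySem.List.index? labels target = none := by
      rw [PySem.List.index?_eq_none_iff]; simpa using hmem
    have hmem2 : (labels.map (fun x => PySem.Str.lower x)).contains (PySem.Str.lower target) = true := by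
      rcases hpre with h | h
      · exact absurd h hmem
      · exact h
    have : (PySem.List.index? (labels.map (fun x => PySem.Str.lower x)) (PySem.Str.lower target)).isSome := by
      rw [PySem.List.index?_isSome_iff]; simpa using hmem2
    obtain ⟨k, hk⟩ := Option.isSome_iff_exists.mp this
    rw [PySem.List.index?_eq_idxOf?] at hk hnone
    have hm : target ∉ labels := by simpa using hmem
    have hex : ∃ a ∈ labels, PySem.Str.lower a = PySem.Str.lower target := by
      simpa [List.mem_map] using hmem2
    simp [hm, hex, hnone, hk]
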